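-- pv_equiv track=rewrite | github.com/aerospike-ce-ecosystem/aerospike-cluster-manager | api/src/aerospike_cluster_manager_api/info_parser.py | aggregate_node_kv
-- ===== SOURCE A (Python) =====
-- from collections.abc import Sequence
--
-- def parse_kv_pairs(response: str, sep: str = ";") -> dict[str, str]:
--     """Parse ``"key=val;key2=val2"`` into a dict."""
--     result: dict[str, str] = {}
--     if not response:
--         return result
--     for part in response.strip().split(sep):
--         if "=" in part:
--             k, v = part.split("=", 1)
--             result[k.strip()] = v.strip()
--     return result
--
-- def safe_int(value: str | None, default: int = 0) -> int:
--     """Convert string to int safely."""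
--     if value is None:
--         return default
--     try:
--         return int(value)
--     except (ValueError, TypeError):
--         return default
--
-- def aggregate_node_kv(
--     info_all_results: Sequence[tuple[str, int | None, str]],
--     keys_to_sum: set[str] | frozenset[str] = frozenset(),
--     keys_to_min: set[str] | frozenset[str] = frozenset(),
-- ) -> dict[str, str]:
--     """Aggregate ``info_all()`` kv-pair responses from multiple nodes.
--
--     * Keys in *keys_to_sum* are summed as integers across nodes.
--     * Keys in *keys_to_min* take the minimum value across nodes.
--     * All other keys use the first node's value.
--
--     Error responses (``err is not None``) are silently skipped.
--     """
--     merged: dict[str, str] = {}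
--     sum_accum: dict[str, int] = {}
--     min_accum: dict[str, int] = {}
--
--     for _name, err, resp in info_all_results:
--         if err:
--             continue
--         kv = parse_kv_pairs(resp)
--         if not merged:
--             merged.update(kv)
--         for k, v in kv.items():
--             if k in keys_to_sum:
--                 sum_accum[k] = sum_accum.get(k, 0) + safe_int(v)
--             elif k in keys_to_min:
--                 cur = safe_int(v)
--                 min_accum[k] = min(min_accum.get(k, cur), cur)
--
--     for k, total in sum_accum.items():
--         merged[k] = str(total)
--     for k, val in min_accum.items():
--         merged[k] = str(val)
--
--     return merged
-- ===== SOURCE B (Python) =====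
-- from collections.abc import Sequence
--
--
-- def parse_kv_pairs(response: str, sep: str = ";") -> dict[str, str]:
--     """Parse ``"key=val;key2=val2"`` into a dict."""
--     result: dict[str, str] = {}
--     if not response:
--         return result
--     for part in response.strip().split(sep):
--         if "=" in part:
--             k, v = part.split("=", 1)
--             result[k.strip()] = v.strip()
--     return result
--
--
-- def safe_int(value: str | None, default: int = 0) -> int:
--     """Convert string to int safely."""
--     if value is None:
--         return default
--     try:
--         return int(value)
--     except (ValueError, TypeError):
--         return default
--
--
-- def aggregate_node_kv(
--     info_all_results: Sequence[tuple[str, int | None, str]],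
--     keys_to_sum: set[str] | frozenset[str] = frozenset(),
--     keys_to_min: set[str] | frozenset[str] = frozenset(),
-- ) -> dict[str, str]:
--     """Collect-then-reduce: parse all ok responses first, then compute each
--     aggregated key's value directly from the collected pairs."""
--     kvs = [parse_kv_pairs(resp) for _name, err, resp in info_all_results if not err]
--     pairs = [(k, v) for kv in kvs for k, v in kv.items()]
--
--     merged = dict(next((kv for kv in kvs if kv), {}))
--
--     seen: list[str] = []
--     for k, _ in pairs:
--         if k not in seen:
--             seen.append(k)
--
--     for k in seen:
--         if k in keys_to_sum:
--             merged[k] = str(sum(safe_int(v) for k2, v in pairs if k2 == k))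
--     for k in seen:
--         if k in keys_to_min and k not in keys_to_sum:
--             merged[k] = str(min(safe_int(v) for k2, v in pairs if k2 == k))
--     return merged
-- ===== Notes on version B (the rewrite author's own statement) =====
-- stated objective: alternative
-- what changed: B replaces A's single pass with running merged/sum_accum/min_accum dictionaries by a collect-then-reduce decomposition: it first parses all non-error responses into a list, flattens them into key-value pairs, takes the first non-empty parse as the base dict, and then recomputes each sum key's total and each min key's minimum directly from the collected pairs in first-occurrence key order.
import Mathlib
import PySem

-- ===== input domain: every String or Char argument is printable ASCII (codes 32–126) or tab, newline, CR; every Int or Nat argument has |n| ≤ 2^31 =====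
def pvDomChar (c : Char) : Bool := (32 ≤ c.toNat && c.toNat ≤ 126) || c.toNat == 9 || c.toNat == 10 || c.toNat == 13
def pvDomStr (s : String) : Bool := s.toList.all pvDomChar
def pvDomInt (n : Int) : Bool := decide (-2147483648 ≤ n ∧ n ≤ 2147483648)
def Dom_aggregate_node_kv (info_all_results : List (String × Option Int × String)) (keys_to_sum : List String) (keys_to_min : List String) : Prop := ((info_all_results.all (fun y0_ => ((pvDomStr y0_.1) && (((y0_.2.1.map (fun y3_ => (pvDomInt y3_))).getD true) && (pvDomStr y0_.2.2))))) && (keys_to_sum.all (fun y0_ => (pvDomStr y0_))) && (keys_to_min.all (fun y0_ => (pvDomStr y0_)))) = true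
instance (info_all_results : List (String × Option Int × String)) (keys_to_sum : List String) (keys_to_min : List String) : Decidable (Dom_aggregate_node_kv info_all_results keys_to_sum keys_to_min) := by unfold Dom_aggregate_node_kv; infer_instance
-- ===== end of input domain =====

-- B re-implements the aggregation as collect-then-reduce (parse all ok responses, then
-- recompute each sum/min key directly from the collected pairs) instead of A's running
-- per-node accumulator dictionaries; same return value, no speed claim (objective: alternative).

-- ===== PORT A =====
-- shared module helpers (used verbatim by both A and B, as in the Python module)
def pvTruthyErr (e : Option Int) : Bool :=
  match e with
  | some n => decide (n ≠ 0)
  | none => false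

def pvSafeInt (v : String) : Int := (PySem.Int.ofStr? v).getD 0

def parse_kv_pairs (response : String) : PySem.Dict String String :=
  if response = "" then PySem.Dict.empty
  else
    ((PySem.Str.split? (PySem.Str.strip response) ";").getD []).foldl
      (fun d part =>
        if PySem.Str.isIn "=" part then
          match (PySem.Str.splitMax? part "=" 1).getD [] with
          | k :: v :: _ => d.insert (PySem.Str.strip k) (PySem.Str.strip v)
          | _ => d      -- unreachable: "=" ∈ part gives two pieces
        else d)
      PySem.Dict.empty

-- A's inner loop body over one kv item, updating (sum_accum, min_accum)
def pvAccStep (ks km : List String) (p : PySem.Dict String Int × PySem.Dict String Int)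
    (it : String × String) : PySem.Dict String Int × PySem.Dict String Int :=
  if ks.contains it.1 then
    (p.1.insert it.1 (p.1.getD it.1 0 + pvSafeInt it.2), p.2)
  else if km.contains it.1 then
    let cur := pvSafeInt it.2
    (p.1, p.2.insert it.1 (min (p.2.getD it.1 cur) cur))
  else p

-- "if not merged: merged.update(kv)"
def pvMergeStep (m : PySem.Dict String String) (kv : PySem.Dict String String) :
    PySem.Dict String String :=
  if m.size = 0 then m.update kv.items else m

-- A's per-node loop body
def pvNodeStep (ks km : List String)
    (st : PySem.Dict String String × PySem.Dict String Int × PySem.Dict String Int)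
    (r : String × Option Int × String) :
    PySem.Dict String String × PySem.Dict String Int × PySem.Dict String Int :=
  if pvTruthyErr r.2.1 then st
  else
    let kv := parse_kv_pairs r.2.2
    let merged := pvMergeStep st.1 kv
    let acc := kv.items.foldl (pvAccStep ks km) (st.2.1, st.2.2)
    (merged, acc.1, acc.2)

def aggregate_node_kv (info_all_results : List (String × Option Int × String)) (keys_to_sum : List String) (keys_to_min : List String) : List (String × String) :=
  let st := info_all_results.foldl (pvNodeStep keys_to_sum keys_to_min)
    (PySem.Dict.empty, PySem.Dict.empty, PySem.Dict.empty)
  let merged := st.2.1.items.foldl (fun m kt => m.insert kt.1 (PySem.Int.toStr kt.2)) st.1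
  (st.2.2.items.foldl (fun m kt => m.insert kt.1 (PySem.Int.toStr kt.2)) merged).items

-- ===== PORT B =====
-- sum(safe_int(v) for k2, v in pairs if k2 == k)
def pvSumVal (pairs : List (String × String)) (k : String) : Int :=
  ((pairs.filter (fun p => p.1 == k)).map (fun p => pvSafeInt p.2)).sum

-- min(safe_int(v) for k2, v in pairs if k2 == k); [] unreachable (k is a seen key)
def pvMinVal (pairs : List (String × String)) (k : String) : Int :=
  match (pairs.filter (fun p => p.1 == k)).map (fun p => pvSafeInt p.2) with
  | [] => 0
  | v :: vs => vs.foldl min v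

def aggregate_node_kv_alt (info_all_results : List (String × Option Int × String)) (keys_to_sum : List String) (keys_to_min : List String) : List (String × String) :=
  let kvs := info_all_results.filterMap
    (fun r => if pvTruthyErr r.2.1 then none else some (parse_kv_pairs r.2.2))
  let pairs := kvs.flatMap (fun kv => kv.items)
  let base := (kvs.find? (fun kv => kv.size != 0)).getD PySem.Dict.empty
  let seen := pairs.foldl (fun s p => PySem.Set.add s p.1) ([] : List String)
  let m1 := seen.foldl
    (fun m k => if keys_to_sum.contains k then
        m.insert k (PySem.Int.toStr (pvSumVal pairs k)) else m) base
  let m2 := seen.foldl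
    (fun m k => if keys_to_min.contains k && !keys_to_sum.contains k then
        m.insert k (PySem.Int.toStr (pvMinVal pairs k)) else m) m1
  m2.items

-- ===== PRECONDITION & SPEC =====
def Spec_aggregate_node_kv (info_all_results : List (String × Option Int × String)) (keys_to_sum : List String) (keys_to_min : List String) (out : List (String × String)) : Prop := out = aggregate_node_kv_alt info_all_results keys_to_sum keys_to_min
instance (info_all_results : List (String × Option Int × String)) (keys_to_sum : List String) (keys_to_min : List String) (out : List (String × String)) : Decidable (Spec_aggregate_node_kv info_all_results keys_to_sum keys_to_min out) := by unfold Spec_aggregate_node_kv; infer_instance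

-- ===== CLAIM (what is proved, stated in full; the proofs are below) =====
def Claim_equal_aggregate_node_kv : Prop := ∀ (info_all_results : List (String × Option Int × String)) (keys_to_sum : List String) (keys_to_min : List String), Dom_aggregate_node_kv info_all_results keys_to_sum keys_to_min → Spec_aggregate_node_kv info_all_results keys_to_sum keys_to_min (aggregate_node_kv info_all_results keys_to_sum keys_to_min)

-- ===== LEMMAS AND PROOFS =====

-- proof-side abbreviations
def pvKvs (rs : List (String × Option Int × String)) : List (PySem.Dict String String) :=
  rs.filterMap (fun r => if pvTruthyErr r.2.1 then none else some (parse_kv_pairs r.2.2))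

def pvSeen (pairs : List (String × String)) : List String :=
  pairs.foldl (fun s p => PySem.Set.add s p.1) ([] : List String)

-- the closed-form accumulator tables
def pvSumTab (ks : List String) (pairs : List (String × String)) : PySem.Dict String Int :=
  PySem.Dict.mk (((pvSeen pairs).filter (fun k => ks.contains k)).map
    (fun k => (k, pvSumVal pairs k)))

def pvMinTab (ks km : List String) (pairs : List (String × String)) : PySem.Dict String Int :=
  PySem.Dict.mk (((pvSeen pairs).filter (fun k => km.contains k && !ks.contains k)).map
    (fun k => (k, pvMinVal pairs k)))

theorem pv_nodeStep_split (ks km : List String)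
    (rs : List (String × Option Int × String))
    (m : PySem.Dict String String) (sa ma : PySem.Dict String Int) :
    rs.foldl (pvNodeStep ks km) (m, sa, ma)
      = ((pvKvs rs).foldl pvMergeStep m,
         ((pvKvs rs).flatMap (fun kv => kv.items)).foldl (pvAccStep ks km) (sa, ma)) := by
  induction rs generalizing m sa ma with
  | nil => simp [pvKvs]
  | cons r rs ih =>
    by_cases h : pvTruthyErr r.2.1 = true
    · simp [pvKvs, pvNodeStep, h, ih m sa ma]
    · simp only [Bool.not_eq_true] at h
      simp [pvKvs, pvNodeStep, h, List.foldl_cons, List.foldl_append, ih]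

theorem pv_parse_nodup (s : String) : (parse_kv_pairs s).keys.Nodup := by
  unfold parse_kv_pairs
  split
  · exact List.nodup_nil
  · generalize ((PySem.Str.split? (PySem.Str.strip s) ";").getD []) = parts
    have aux : ∀ (parts : List String) (d : PySem.Dict String String), d.keys.Nodup →
        (parts.foldl (fun d part =>
          if PySem.Str.isIn "=" part then
            match (PySem.Str.splitMax? part "=" 1).getD [] with
            | k :: v :: _ => d.insert (PySem.Str.strip k) (PySem.Str.strip v)
            | _ => d
          else d) d).keys.Nodup := by
      intro parts
      induction parts with
      | nil => intro d h; exact h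
      | cons part rest ih =>
        intro d h
        refine ih _ ?_
        dsimp only
        split
        · split
          · exact PySem.Dict.nodup_keys_insert _ _ _ h
          · exact h
        · exact h
    exact aux parts _ PySem.Dict.nodup_keys_empty

theorem pv_foldl_merge_nonempty (kvs : List (PySem.Dict String String))
    (m : PySem.Dict String String) (h : m.size ≠ 0) :
    kvs.foldl pvMergeStep m = m := by
  induction kvs with
  | nil => rfl
  | cons kv rest ih => simpa [pvMergeStep, h] using ih

theorem pv_update_empty (kv : PySem.Dict String String) (h : kv.keys.Nodup) :
    (PySem.Dict.empty : PySem.Dict String String).update kv.items = kv := by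
  apply PySem.Dict.ext
  unfold PySem.Dict.update
  have h2 := PySem.Dict.items_foldl_insert_fresh kv.items Prod.fst Prod.snd PySem.Dict.empty
    (fun a _ => PySem.Dict.contains_empty (ν := String) a.1) h
  exact h2.trans (by simp [PySem.Dict.empty])

theorem pv_merge_char (kvs : List (PySem.Dict String String))
    (h : ∀ kv ∈ kvs, kv.keys.Nodup) :
    kvs.foldl pvMergeStep PySem.Dict.empty
      = (kvs.find? (fun kv => kv.size != 0)).getD PySem.Dict.empty := by
  induction kvs with
  | nil => rfl
  | cons kv rest ih =>
    have h1 : (PySem.Dict.empty : PySem.Dict String String).size = 0 := rfl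
    have hstep : pvMergeStep PySem.Dict.empty kv = kv := by
      simp [pvMergeStep, h1, pv_update_empty kv (h kv (List.mem_cons_self ..))]
    by_cases hkv : kv.size = 0
    · have hkvempty : kv = PySem.Dict.empty := by
        apply PySem.Dict.ext
        simpa [PySem.Dict.size, List.length_eq_zero_iff] using hkv
      rw [List.foldl_cons, hstep, hkvempty, ih (fun x hx => h x (List.mem_cons_of_mem _ hx))]
      simp [List.find?_cons]
    · rw [List.foldl_cons, hstep, pv_foldl_merge_nonempty _ _ hkv]
      simp [List.find?_cons, hkv]

-- get? on a table built as keys.map (fun k => (k, f k))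
theorem pv_tab_get? (L : List String) (f : String → Int) (x : String) :
    (PySem.Dict.mk (L.map (fun k => (k, f k)))).get? x
      = if x ∈ L then some (f x) else none := by
  induction L with
  | nil => simp [PySem.Dict.get?]
  | cons k rest ih =>
    rw [List.map_cons, PySem.Dict.get?_mk_cons, ih]
    by_cases hk : k = x
    · subst hk; simp
    · simp only [beq_iff_eq, hk, if_neg, List.mem_cons]
      have : ¬ x = k := fun he => hk he.symm
      simp [this]

theorem pv_tab_contains (L : List String) (f : String → Int) (x : String) :
    (PySem.Dict.mk (L.map (fun k => (k, f k)))).contains x = decide (x ∈ L) := by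
  simp [PySem.Dict.contains, List.any_map, List.any_eq_true]
  rw [Bool.eq_iff_iff]
  simp

theorem pv_seen_snoc (l : List (String × String)) (p : String × String) :
    pvSeen (l ++ [p]) = PySem.Set.add (pvSeen l) p.1 := by
  simp [pvSeen, List.foldl_append]

theorem pv_seen_eq_ofList (l : List (String × String)) :
    pvSeen l = PySem.Set.ofList (l.map Prod.fst) := by
  rw [PySem.Set.ofList_eq_foldl, List.foldl_map]
  rfl

theorem pv_mem_seen (l : List (String × String)) (x : String) :
    x ∈ pvSeen l ↔ x ∈ l.map Prod.fst := by
  rw [pv_seen_eq_ofList]; exact PySem.Set.mem_ofList _ _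

theorem pv_sumVal_snoc (l : List (String × String)) (p : String × String) (k : String) :
    pvSumVal (l ++ [p]) k = pvSumVal l k + (if p.1 = k then pvSafeInt p.2 else 0) := by
  by_cases h : p.1 = k <;> simp [pvSumVal, List.filter_append, h]

theorem pv_sumVal_not_mem (l : List (String × String)) (k : String)
    (h : k ∉ l.map Prod.fst) : pvSumVal l k = 0 := by
  have : l.filter (fun p => p.1 == k) = [] := by
    rw [List.filter_eq_nil_iff]
    intro p hp
    simp only [beq_iff_eq]
    intro he; exact h (he ▸ List.mem_map_of_mem hp)
  simp [pvSumVal, this]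

theorem pv_minVal_snoc_ne (l : List (String × String)) (p : String × String) (k : String)
    (h : p.1 ≠ k) : pvMinVal (l ++ [p]) k = pvMinVal l k := by
  simp [pvMinVal, List.filter_append, h]

theorem pv_minVal_snoc_self_mem (l : List (String × String)) (p : String × String)
    (h : p.1 ∈ l.map Prod.fst) :
    pvMinVal (l ++ [p]) p.1 = min (pvMinVal l p.1) (pvSafeInt p.2) := by
  obtain ⟨q, hq, hq1⟩ := List.exists_of_mem_map h
  have hne : l.filter (fun r => r.1 == p.1) ≠ [] := by
    intro hnil
    have := List.filter_eq_nil_iff.mp hnil q hq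
    simp [hq1] at this
  unfold pvMinVal
  rw [List.filter_append]
  simp only [List.filter_cons, List.filter_nil, beq_self_eq_true, if_pos rfl, List.map_append]
  cases hfl : (l.filter (fun r => r.1 == p.1)).map (fun r => pvSafeInt r.2) with
  | nil => simp [List.map_eq_nil_iff.mp hfl] at hne
  | cons v vs => simp [List.foldl_append]

theorem pv_minVal_snoc_self_not_mem (l : List (String × String)) (p : String × String)
    (h : p.1 ∉ l.map Prod.fst) :
    pvMinVal (l ++ [p]) p.1 = pvSafeInt p.2 := by
  have : l.filter (fun r => r.1 == p.1) = [] := by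
    rw [List.filter_eq_nil_iff]
    intro q hq
    simp only [beq_iff_eq]
    intro he; exact h (he ▸ List.mem_map_of_mem hq)
  simp [pvMinVal, List.filter_append, this]

theorem pv_acc_char (ks km : List String) (pairs : List (String × String)) :
    pairs.foldl (pvAccStep ks km) (PySem.Dict.empty, PySem.Dict.empty)
      = (pvSumTab ks pairs, pvMinTab ks km pairs) := by
  induction pairs using List.reverseRecOn with
  | nil => simp [pvSumTab, pvMinTab, pvSeen, PySem.Dict.empty]
  | append_singleton l p ih =>
    rw [List.foldl_append, List.foldl_cons, List.foldl_nil, ih]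
    by_cases hks : ks.contains p.1 = true
    · -- sum branch
      have hksmem : p.1 ∈ ks := by simpa using hks
      have hMkeys : (pvSeen (l ++ [p])).filter (fun k => km.contains k && !ks.contains k)
          = (pvSeen l).filter (fun k => km.contains k && !ks.contains k) := by
        rw [pv_seen_snoc]
        unfold PySem.Set.add
        split
        · rfl
        · simp [List.filter_append, hksmem]
      have hMtab : pvMinTab ks km (l ++ [p]) = pvMinTab ks km l := by
        unfold pvMinTab
        rw [hMkeys]
        congr 1
        apply List.map_congr_left
        intro k hk
        have hkks : ks.contains k = false := by
          have h2 := (List.mem_filter.mp hk).2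
          simp only [Bool.and_eq_true, Bool.not_eq_true'] at h2
          exact h2.2
        have hne : p.1 ≠ k := fun he => by rw [he, hkks] at hks; cases hks
        rw [pv_minVal_snoc_ne l p k hne]
      have hStab : (pvSumTab ks l).insert p.1 ((pvSumTab ks l).getD p.1 0 + pvSafeInt p.2)
          = pvSumTab ks (l ++ [p]) := by
        by_cases hmem : p.1 ∈ pvSeen l
        · have hmemS : p.1 ∈ (pvSeen l).filter (fun k => ks.contains k) :=
            List.mem_filter.mpr ⟨hmem, hks⟩
          have hkeys : (pvSeen (l ++ [p])).filter (fun k => ks.contains k)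
              = (pvSeen l).filter (fun k => ks.contains k) := by
            rw [pv_seen_snoc]
            unfold PySem.Set.add
            rw [if_pos (by rw [PySem.Set.contains_iff]; exact hmem)]
          unfold pvSumTab
          have hcont : (PySem.Dict.mk (((pvSeen l).filter (fun k => ks.contains k)).map
              (fun k => (k, pvSumVal l k)))).contains p.1 = true := by
            rw [pv_tab_contains]; simpa using hmemS
          have hget : (PySem.Dict.mk (((pvSeen l).filter (fun k => ks.contains k)).map
              (fun k => (k, pvSumVal l k)))).getD p.1 0 = pvSumVal l p.1 := by
            unfold PySem.Dict.getD
            rw [pv_tab_get?, if_pos hmemS]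
            rfl
          apply PySem.Dict.ext
          rw [hget, PySem.Dict.items_insert_of_contains _ _ hcont, hkeys]
          show _ = List.map _ _
          rw [List.map_map]
          apply List.map_congr_left
          intro k hk
          by_cases hkp : k = p.1
          · subst hkp
            simp [pv_sumVal_snoc]
          · have hpk : ¬ p.1 = k := fun he => hkp (Eq.symm he)
            simp [hkp, pv_sumVal_snoc, hpk]
        · have hmemS : p.1 ∉ (pvSeen l).filter (fun k => ks.contains k) := by
            simp only [List.mem_filter]; tauto
          have hkeys : (pvSeen (l ++ [p])).filter (fun k => ks.contains k)
              = (pvSeen l).filter (fun k => ks.contains k) ++ [p.1] := by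
            rw [pv_seen_snoc]
            unfold PySem.Set.add
            rw [if_neg (by rw [PySem.Set.contains_iff]; exact hmem)]
            simp [List.filter_append, hksmem]
          have hzero : pvSumVal l p.1 = 0 :=
            pv_sumVal_not_mem l p.1 (fun h => hmem ((pv_mem_seen l p.1).mpr h))
          unfold pvSumTab
          have hcont : (PySem.Dict.mk (((pvSeen l).filter (fun k => ks.contains k)).map
              (fun k => (k, pvSumVal l k)))).contains p.1 = false := by
            rw [pv_tab_contains]; simpa using hmemS
          have hget : (PySem.Dict.mk (((pvSeen l).filter (fun k => ks.contains k)).map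
              (fun k => (k, pvSumVal l k)))).getD p.1 0 = 0 := by
            unfold PySem.Dict.getD
            rw [pv_tab_get?, if_neg hmemS]
            rfl
          apply PySem.Dict.ext
          rw [hget, PySem.Dict.items_insert_of_not_contains _ _ hcont, hkeys]
          rw [List.map_append]
          congr 1
          · apply List.map_congr_left
            intro k hk
            have hpk : ¬ p.1 = k := fun he => hmem ((he ▸ (List.mem_filter.mp hk).1))
            rw [pv_sumVal_snoc]
            simp [hpk]
          · simp [pv_sumVal_snoc, hzero]
      simp [pvAccStep, hksmem, hStab, hMtab]
    · -- not a sum key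
      have hks' : ks.contains p.1 = false := by simpa using hks
      have hksnot : p.1 ∉ ks := by simpa using hks'
      have hSkeys : (pvSeen (l ++ [p])).filter (fun k => ks.contains k)
          = (pvSeen l).filter (fun k => ks.contains k) := by
        rw [pv_seen_snoc]
        unfold PySem.Set.add
        split
        · rfl
        · simp [List.filter_append, hksnot]
      have hStab : pvSumTab ks (l ++ [p]) = pvSumTab ks l := by
        unfold pvSumTab
        rw [hSkeys]
        congr 1
        apply List.map_congr_left
        intro k hk
        have hkks : ks.contains k = true := (List.mem_filter.mp hk).2
        have hne : ¬ p.1 = k := fun he => by rw [he, hkks] at hks'; cases hks'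
        rw [pv_sumVal_snoc]
        simp [hne]
      by_cases hkm : km.contains p.1 = true
      · -- min branch
        have hkmmem : p.1 ∈ km := by simpa using hkm
        have hMtab : (pvMinTab ks km l).insert p.1
              (min ((pvMinTab ks km l).getD p.1 (pvSafeInt p.2)) (pvSafeInt p.2))
            = pvMinTab ks km (l ++ [p]) := by
          by_cases hmem : p.1 ∈ pvSeen l
          · have hmemM : p.1 ∈ (pvSeen l).filter (fun k => km.contains k && !ks.contains k) :=
              List.mem_filter.mpr ⟨hmem, by rw [Bool.and_eq_true]; exact ⟨hkm, by simpa using hksnot⟩⟩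
            have hkeys : (pvSeen (l ++ [p])).filter (fun k => km.contains k && !ks.contains k)
                = (pvSeen l).filter (fun k => km.contains k && !ks.contains k) := by
              rw [pv_seen_snoc]
              unfold PySem.Set.add
              rw [if_pos (by rw [PySem.Set.contains_iff]; exact hmem)]
            unfold pvMinTab
            have hcont : (PySem.Dict.mk
                (((pvSeen l).filter (fun k => km.contains k && !ks.contains k)).map
                  (fun k => (k, pvMinVal l k)))).contains p.1 = true := by
              rw [pv_tab_contains]; simpa using hmemM
            have hget : (PySem.Dict.mk
                (((pvSeen l).filter (fun k => km.contains k && !ks.contains k)).map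
                  (fun k => (k, pvMinVal l k)))).getD p.1 (pvSafeInt p.2) = pvMinVal l p.1 := by
              unfold PySem.Dict.getD
              rw [pv_tab_get?, if_pos hmemM]
              rfl
            apply PySem.Dict.ext
            rw [hget, PySem.Dict.items_insert_of_contains _ _ hcont, hkeys]
            show _ = List.map _ _
            rw [List.map_map]
            apply List.map_congr_left
            intro k hk
            by_cases hkp : k = p.1
            · subst hkp
              have := pv_minVal_snoc_self_mem l p ((pv_mem_seen l p.1).mp hmem)
              simp [this]
            · have hpk : p.1 ≠ k := fun he => hkp (Eq.symm he)
              simp [hkp, pv_minVal_snoc_ne l p k hpk]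
          · have hmemM : p.1 ∉ (pvSeen l).filter
                (fun k => km.contains k && !ks.contains k) := by
              simp only [List.mem_filter]; tauto
            have hkeys : (pvSeen (l ++ [p])).filter (fun k => km.contains k && !ks.contains k)
                = (pvSeen l).filter (fun k => km.contains k && !ks.contains k) ++ [p.1] := by
              rw [pv_seen_snoc]
              unfold PySem.Set.add
              rw [if_neg (by rw [PySem.Set.contains_iff]; exact hmem)]
              simp [List.filter_append, hkmmem, hksnot]
            unfold pvMinTab
            have hcont : (PySem.Dict.mk
                (((pvSeen l).filter (fun k => km.contains k && !ks.contains k)).map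
                  (fun k => (k, pvMinVal l k)))).contains p.1 = false := by
              rw [pv_tab_contains]; simpa using hmemM
            have hget : (PySem.Dict.mk
                (((pvSeen l).filter (fun k => km.contains k && !ks.contains k)).map
                  (fun k => (k, pvMinVal l k)))).getD p.1 (pvSafeInt p.2) = pvSafeInt p.2 := by
              unfold PySem.Dict.getD
              rw [pv_tab_get?, if_neg hmemM]
              rfl
            apply PySem.Dict.ext
            rw [hget, min_self, PySem.Dict.items_insert_of_not_contains _ _ hcont, hkeys]
            rw [List.map_append]
            congr 1
            · apply List.map_congr_left
              intro k hk
              have hpk : p.1 ≠ k := fun he => hmem ((he ▸ (List.mem_filter.mp hk).1))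
              rw [pv_minVal_snoc_ne l p k hpk]
            · simp [pv_minVal_snoc_self_not_mem l p
                (fun h => hmem ((pv_mem_seen l p.1).mpr h))]
        simp [pvAccStep, hksnot, hkmmem, hStab]
        exact hMtab
      · -- neither
        have hkm' : km.contains p.1 = false := by simpa using hkm
        have hkmnot : p.1 ∉ km := by simpa using hkm'
        have hMkeys : (pvSeen (l ++ [p])).filter (fun k => km.contains k && !ks.contains k)
            = (pvSeen l).filter (fun k => km.contains k && !ks.contains k) := by
          rw [pv_seen_snoc]
          unfold PySem.Set.add
          split
          · rfl
          · simp [List.filter_append, hkmnot]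
        have hMtab : pvMinTab ks km (l ++ [p]) = pvMinTab ks km l := by
          unfold pvMinTab
          rw [hMkeys]
          congr 1
          apply List.map_congr_left
          intro k hk
          have hkkm : km.contains k = true := by
            have h2 := (List.mem_filter.mp hk).2
            simp only [Bool.and_eq_true] at h2
            exact h2.1
          have hne : p.1 ≠ k := fun he => by rw [he, hkkm] at hkm'; cases hkm'
          rw [pv_minVal_snoc_ne l p k hne]
        simp [pvAccStep, hksnot, hkmnot, hStab, hMtab]

-- a guarded foldl is a foldl over the filtered list
theorem pv_foldl_guard {α β : Type} (p : α → Bool) (g : β → α → β)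
    (l : List α) (m0 : β) :
    l.foldl (fun m k => if p k then g m k else m) m0 = (l.filter p).foldl g m0 := by
  induction l generalizing m0 with
  | nil => rfl
  | cons x xs ih =>
    by_cases h : p x = true <;> simp [List.filter_cons, h, ih]

theorem pv_final_loops (ks km : List String)
    (rs : List (String × Option Int × String)) :
    aggregate_node_kv rs ks km = aggregate_node_kv_alt rs ks km := by
  simp only [aggregate_node_kv, aggregate_node_kv_alt]
  rw [pv_nodeStep_split, pv_acc_char]
  dsimp only
  rw [pv_merge_char _ (by
    intro kv hkv
    simp only [pvKvs, List.mem_filterMap] at hkv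
    obtain ⟨r, _, hr⟩ := hkv
    split at hr
    · cases hr
    · cases hr; exact pv_parse_nodup _)]
  rw [pv_foldl_guard, pv_foldl_guard]
  simp only [pvSumTab, pvMinTab, PySem.Dict.items, List.foldl_map]
  rfl

-- ===== VERDICT (by name: the statement is the Claim_ definition above) =====
theorem aggregate_node_kv_spec : Claim_equal_aggregate_node_kv := by
  intro rs ks km _
  unfold Spec_aggregate_node_kv
  exact pv_final_loops ks km rs
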